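-- pv_equiv track=rewrite | github.com/kflintham/ops_engine | src/ops_engine/integrations/gardiner_brothers_jit/brightpearl_queries.py | _csv_ids
-- ===== SOURCE A (Python) =====
-- def _csv_ids(ids: list[int]) -> str:
--     # de-duplicate while preserving order
--     seen: set[int] = set()
--     unique: list[int] = []
--     for i in ids:
--         if i not in seen:
--             seen.add(i)
--             unique.append(i)
--     return ",".join(str(i) for i in unique)
-- ===== SOURCE B (Python) =====
-- def _csv_ids(ids: list[int]) -> str:
--     # peel first element, purge all its duplicates from the remainder, repeat
--     parts: list[str] = []
--     rest = ids
--     while rest: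
--         h = rest[0]
--         parts.append(str(h))
--         rest = [y for y in rest[1:] if y != h]
--     return ",".join(parts)
-- ===== Notes on version B (the rewrite author's own statement) =====
-- stated objective: alternative
-- what changed: Replaces the seen-set tracked single pass with a peel-and-purge loop: emit the head, filter every duplicate of it out of the remaining list, and repeat on the shrunken list; no membership structure is maintained at all.
import Mathlib
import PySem

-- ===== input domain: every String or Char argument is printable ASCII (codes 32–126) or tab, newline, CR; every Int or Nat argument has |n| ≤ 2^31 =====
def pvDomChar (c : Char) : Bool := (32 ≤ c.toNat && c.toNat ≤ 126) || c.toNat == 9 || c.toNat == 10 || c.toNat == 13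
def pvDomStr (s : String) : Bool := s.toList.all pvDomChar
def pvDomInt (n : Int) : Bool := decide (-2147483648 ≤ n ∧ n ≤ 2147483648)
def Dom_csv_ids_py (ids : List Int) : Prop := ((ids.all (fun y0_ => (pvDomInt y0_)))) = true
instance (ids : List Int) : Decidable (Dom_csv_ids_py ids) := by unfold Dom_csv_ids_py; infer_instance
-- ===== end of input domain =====

-- Header: B replaces A's seen-set single pass by a peel-and-purge loop (emit head,
-- filter its duplicates out of the rest, repeat); alternative algorithm, same value.

-- ===== PORT A =====
-- the for-loop of A: state (seen, unique), branch order preserved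
def csvALoop (l : List Int) (seen : PySem.Set Int) (unique : List Int) : List Int :=
  match l with
  | [] => unique
  | i :: rest =>
      if PySem.Set.contains seen i then csvALoop rest seen unique
      else csvALoop rest (PySem.Set.add seen i) (unique ++ [i])

def csv_ids_py (ids : List Int) : String :=
  PySem.Str.join "," ((csvALoop ids PySem.Set.empty []).map PySem.Int.toStr)

-- ===== PORT B =====
-- the while-loop of B: emit str(head), purge head's duplicates from the rest
def csvBLoop (parts : List String) (rest : List Int) : List String :=
  match rest with
  | [] => parts
  | h :: t => csvBLoop (parts ++ [PySem.Int.toStr h]) (t.filter (fun y => y != h))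
termination_by rest.length
decreasing_by
  simp only [List.length_cons]
  simpa using Nat.lt_succ_of_le (le_trans (List.length_filter_le _ _) (by simp))

def csv_ids_py_alt (ids : List Int) : String :=
  PySem.Str.join "," (csvBLoop [] ids)

-- ===== PRECONDITION & SPEC =====
def Spec_csv_ids_py (ids : List Int) (out : String) : Prop := out = csv_ids_py_alt ids
instance (ids : List Int) (out : String) : Decidable (Spec_csv_ids_py ids out) := by unfold Spec_csv_ids_py; infer_instance

-- ===== CLAIM =====
def Claim_equal_csv_ids_py : Prop := ∀ (ids : List Int), Dom_csv_ids_py ids → Spec_csv_ids_py ids (csv_ids_py ids)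

-- ===== LEMMAS AND PROOFS =====

theorem csv_main (l : List Int) : ∀ (S : PySem.Set Int) (u : List Int),
    (csvALoop l S u).map PySem.Int.toStr
      = csvBLoop (u.map PySem.Int.toStr)
          (l.filter (fun x => !PySem.Set.contains S x)) := by
  induction l with
  | nil => intro S u; simp [csvALoop, csvBLoop]
  | cons i rest ih =>
      intro S u
      by_cases hS : PySem.Set.contains S i = true
      · simp only [csvALoop, hS, if_true, List.filter_cons, Bool.not_eq_true']
        rw [if_neg (by simp only [PySem.Set.contains] at hS ⊢; simp [hS])]
        exact ih S u
      · have hS' : PySem.Set.contains S i = false := by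
          cases h : PySem.Set.contains S i
          · rfl
          · exact absurd h hS
        simp only [csvALoop, hS', Bool.false_eq_true, if_false, List.filter_cons]
        rw [if_pos (by simp only [PySem.Set.contains] at hS' ⊢; simp [hS'])]
        rw [csvBLoop, ih (PySem.Set.add S i) (u ++ [i]), List.map_append,
          List.filter_filter]
        congr 1
        refine List.filter_congr fun x _ => ?_
        have hiS : i ∉ S := by simpa [PySem.Set.contains] using hS'
        simp only [PySem.Set.add, PySem.Set.contains, hiS, if_false,
          List.mem_append, List.mem_singleton, bne]
        cases hxi : decide (x = i) <;> cases hxS : decide (x ∈ S) <;>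
          simp_all
  -- end csv_main

-- ===== VERDICT =====
theorem csv_ids_py_spec : Claim_equal_csv_ids_py := by
  intro ids _
  show csv_ids_py ids = csv_ids_py_alt ids
  unfold csv_ids_py csv_ids_py_alt
  have h := csv_main ids PySem.Set.empty []
  simp only [List.map_nil] at h
  rw [h]
  congr 1
  have : (fun x => !PySem.Set.contains PySem.Set.empty x) = fun _ : Int => true := by
    funext x; simp [PySem.Set.contains, PySem.Set.empty]
  rw [this, List.filter_true]
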